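-- pv_equiv track=rewrite | github.com/TakenouchiTR/CS3280-Credit-Card-Validator | utils.py | get_number_length
-- ===== SOURCE A (Python) =====
-- def get_number_length(data, starting_digit_length):
--     result = ""
--     data_sections = data.split(",")
--
--     for i in range(len(data_sections)):
--         length = int(data_sections[i])
--         if i == 0:
--             result += r"\d"
--             result += "{{{}}}".format(length - starting_digit_length)
--         else:
--             result += r"(\d"
--             prev_length = int(data_sections[i - 1])
--             result += "{{{}}})?".format(length - prev_length)
--
--     return result
-- ===== SOURCE B (Python) =====
-- def _tail(prev, sep, rest):
--     if not sep:
--         return ""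
--     head, sep, rest = rest.partition(",")
--     cur = int(head)
--     return "(\\d{%d})?" % (cur - prev) + _tail(cur, sep, rest)
--
-- def get_number_length(data, starting_digit_length):
--     head, sep, rest = data.partition(",")
--     cur = int(head)
--     return "\\d{%d}" % (cur - starting_digit_length) + _tail(cur, sep, rest)
-- ===== Notes on version B (the rewrite author's own statement) =====
-- stated objective: alternative
-- what changed: B never materializes the section list: it recursively peels one section at a time off the raw string with str.partition, carrying the previous threshold through the recursion, instead of A's index-loop over data.split(",") that re-parses section i-1 at every step.
import Mathlib
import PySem

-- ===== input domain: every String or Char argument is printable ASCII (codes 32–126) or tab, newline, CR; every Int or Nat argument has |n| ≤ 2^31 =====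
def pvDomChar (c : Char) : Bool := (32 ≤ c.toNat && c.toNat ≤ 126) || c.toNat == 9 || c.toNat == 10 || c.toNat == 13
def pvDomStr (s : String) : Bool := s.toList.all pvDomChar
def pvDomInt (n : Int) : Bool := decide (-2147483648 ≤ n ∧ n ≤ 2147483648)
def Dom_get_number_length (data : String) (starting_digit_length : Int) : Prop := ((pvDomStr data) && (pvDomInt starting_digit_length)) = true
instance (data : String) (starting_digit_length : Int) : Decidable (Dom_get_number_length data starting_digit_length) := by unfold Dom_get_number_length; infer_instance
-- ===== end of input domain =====

-- B never builds the section list: it recursively peels one section at a time off the raw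
-- string with str.partition, carrying the previous threshold (objective: alternative decomposition).

-- ===== PORT A =====
def get_number_length (data : String) (starting_digit_length : Int) : String :=
  let data_sections := (PySem.Str.split? data ",").getD []   -- data.split(","): sep nonempty, so split? is always some
  (PySem.List.pyRange 0 data_sections.length 1).foldl (fun result i =>
    let length := (PySem.Int.ofStr? (PySem.List.pyGetD data_sections i "")).getD 0  -- int(...): none (ValueError) excluded by Pre_
    if i == 0 then
      result ++ "\\d" ++ ("{" ++ PySem.Int.toStr (length - starting_digit_length) ++ "}")
    else
      let prev_length := (PySem.Int.ofStr? (PySem.List.pyGetD data_sections (i - 1) "")).getD 0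
      result ++ "(\\d" ++ ("{" ++ PySem.Int.toStr (length - prev_length) ++ "})?")) ""

-- ===== PORT B =====
-- str.partition(","): exact hand port (PySem has no partition); returns the part before the
-- first ',', a flag (Python: the separator string, truthy iff it was found), the part after it.
def pvPartition : List Char → List Char × Bool × List Char
  | [] => ([], false, [])
  | c :: t =>
    if c = ',' then ([], true, t)
    else
      let p := pvPartition t
      (c :: p.1, p.2.1, p.2.2)

-- termination facts for pvTailGo (cited by its decreasing_by)
theorem pvPartition_after_lt (l : List Char) (h : (pvPartition l).2.1 = true) :
    (pvPartition l).2.2.length < l.length := by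
  induction l with
  | nil => simp [pvPartition] at h
  | cons c t ih =>
    by_cases hc : c = ','
    · simp [pvPartition, hc]
    · simp only [pvPartition, if_neg hc] at h ⊢
      exact Nat.lt_succ_of_lt (ih h)

theorem pvPartition_after_nil (l : List Char) (h : (pvPartition l).2.1 = false) :
    (pvPartition l).2.2 = [] := by
  induction l with
  | nil => simp [pvPartition]
  | cons c t ih =>
    by_cases hc : c = ','
    · simp [pvPartition, hc] at h
    · simp only [pvPartition, if_neg hc] at h ⊢
      exact ih h

-- _tail(prev, sep, rest) from Source B
def pvTailGo (prev : Int) (sep : Bool) (rest : List Char) : String :=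
  match sep with
  | false => ""
  | true =>
    let p := pvPartition rest
    let cur := (PySem.Int.ofChars? p.1).getD 0    -- int(head); none (ValueError) excluded by Pre_
    "(\\d{" ++ PySem.Int.toStr (cur - prev) ++ "})?" ++ pvTailGo cur p.2.1 p.2.2
termination_by rest.length + (if sep then 1 else 0)
decreasing_by
  by_cases hf : (pvPartition rest).2.1 = true
  · simp only [hf, if_true]
    exact Nat.add_lt_add_right (pvPartition_after_lt rest hf) 1
  · simp only [Bool.not_eq_true] at hf
    rw [pvPartition_after_nil rest hf]
    simp [hf]

def get_number_length_alt (data : String) (starting_digit_length : Int) : String :=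
  let p := pvPartition data.toList
  let cur := (PySem.Int.ofChars? p.1).getD 0      -- int(head); none (ValueError) excluded by Pre_
  "\\d{" ++ PySem.Int.toStr (cur - starting_digit_length) ++ "}" ++ pvTailGo cur p.2.1 p.2.2

-- ===== PRECONDITION & SPEC =====
-- Pre_ excludes exactly the inputs where A raises ValueError: some comma-section of data is not int()-parsable.
def Pre_get_number_length (data : String) (starting_digit_length : Int) : Prop :=
  (((PySem.Str.split? data ",").getD []).all (fun s => (PySem.Int.ofStr? s).isSome)) = true
instance (data : String) (starting_digit_length : Int) : Decidable (Pre_get_number_length data starting_digit_length) := by unfold Pre_get_number_length; infer_instance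
def pvWitness_get_number_length : String × Int := ("16,19", 10)

def Spec_get_number_length (data : String) (starting_digit_length : Int) (out : String) : Prop := out = get_number_length_alt data starting_digit_length
instance (data : String) (starting_digit_length : Int) (out : String) : Decidable (Spec_get_number_length data starting_digit_length out) := by unfold Spec_get_number_length; infer_instance

-- ===== CLAIM (what is proved, stated in full; the proofs are below) =====
def Claim_equal_get_number_length : Prop := ∀ (data : String) (starting_digit_length : Int), Dom_get_number_length data starting_digit_length → Pre_get_number_length data starting_digit_length → Spec_get_number_length data starting_digit_length (get_number_length data starting_digit_length)

-- ===== LEMMAS AND PROOFS =====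

-- splitOn's worker, for sep ",", computes: accumulator, then cur ++ the part before the first
-- comma, then (if a comma was found) the split of the part after it.
theorem pv_go_part (l : List Char) : ∀ (fuel : Nat) (cur : List Char) (acc : List (List Char)),
    l.length < fuel →
    PySem.Chars.splitOn.go [','] fuel l cur acc =
      acc.reverse ++ ((cur.reverse ++ (pvPartition l).1) ::
        (if (pvPartition l).2.1 then PySem.Chars.splitOn (pvPartition l).2.2 [','] else [])) := by
  induction l with
  | nil =>
    intro fuel cur acc hf
    cases fuel with
    | zero => omega
    | succ n => simp [PySem.Chars.splitOn.go, pvPartition]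
  | cons c rest ih =>
    intro fuel cur acc hf
    cases fuel with
    | zero => omega
    | succ n =>
      have h1 : rest.length < n := by simpa using hf
      rw [PySem.Chars.splitOn.go]
      by_cases hc : c = ','
      · have hpre : List.isPrefixOf [','] (c :: rest) = true := by simp [hc, List.isPrefixOf]
        rw [if_pos hpre]
        subst hc
        have hp : pvPartition (',' :: rest) = ([], true, rest) := by simp [pvPartition]
        rw [hp]
        have hs : PySem.Chars.splitOn rest [','] =
            ((pvPartition rest).1) ::
              (if (pvPartition rest).2.1 then PySem.Chars.splitOn (pvPartition rest).2.2 [','] else []) := by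
          rw [PySem.Chars.splitOn, ih (rest.length + 1) [] [] (Nat.lt_succ_self _)]
          simp
        rw [show List.drop (List.length [',']) (',' :: rest) = rest by simp]
        rw [ih n [] (cur.reverse :: acc) h1, hs]
        simp
      · have hpre : List.isPrefixOf [','] (c :: rest) = false := by
          simp [List.isPrefixOf]
          exact fun h => absurd h.symm hc
        rw [if_neg (by simp [hpre])]
        rw [ih n (c :: cur) acc h1]
        simp only [pvPartition, if_neg hc]
        simp

-- Source B's tail recursion, restated over the already-split section list
def pvTailList (prev : Int) : List String → String
  | [] => ""
  | x :: t =>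
    "(\\d{" ++ PySem.Int.toStr ((PySem.Int.ofStr? x).getD 0 - prev) ++ "})?" ++
      pvTailList ((PySem.Int.ofStr? x).getD 0) t

theorem pv_go_eq_tailList (prev : Int) (sep : Bool) (rest : List Char) :
    pvTailGo prev sep rest =
      pvTailList prev ((if sep then PySem.Chars.splitOn rest [','] else []).map String.ofList) := by
  induction prev, sep, rest using pvTailGo.induct with
  | case1 prev rest => rw [pvTailGo]; simp [pvTailList]
  | case2 prev rest p cur ih =>
    rw [pvTailGo]
    rw [if_pos rfl]
    rw [PySem.Chars.splitOn, pv_go_part rest (rest.length + 1) [] [] (Nat.lt_succ_self _)]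
    simp only [List.reverse_nil, List.nil_append, List.map_cons, pvTailList]
    rw [ih]
    have hx : (PySem.Int.ofStr? (String.ofList (pvPartition rest).1)).getD 0
        = (PySem.Int.ofChars? (pvPartition rest).1).getD 0 := by
      simp [PySem.Int.ofStr?]
    rw [hx]

-- join with empty separator peels off the head
theorem pv_join_empty_cons (a : String) (l : List String) :
    PySem.Str.join "" (a :: l) = a ++ PySem.Str.join "" l := by
  apply String.toList_inj.mp
  rw [String.toList_append, PySem.Str.toList_join, PySem.Str.toList_join]
  cases l with
  | nil => simp [PySem.Chars.join_singleton, PySem.Chars.join_nil]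
  | cons b t =>
    rw [List.map_cons, List.map_cons, PySem.Chars.join_cons_cons]
    simp

-- fold that appends fragments = join of mapped fragments
theorem pv_foldl_append_join {α : Type} (f : α → String) (l : List α) (acc : String) :
    l.foldl (fun r x => r ++ f x) acc = acc ++ PySem.Str.join "" (l.map f) := by
  induction l generalizing acc with
  | nil =>
    have h : PySem.Str.join "" ([] : List String) = "" := rfl
    simp [h]
  | cons x t ih =>
    rw [List.map_cons, pv_join_empty_cons, List.foldl_cons, ih, String.append_assoc]

-- the indices 1..n-1, paired with their predecessor, read off the consecutive pairs
theorem pv_map_pairs (xs : List String) :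
    (PySem.List.pyRange 1 (xs.length : Int) 1).map
      (fun i => (PySem.List.pyGetD xs (i - 1) "", PySem.List.pyGetD xs i "")) = xs.zip xs.tail := by
  apply List.ext_getElem
  · simp [PySem.List.length_pyRange_one]
  · intro k h1 h2
    have hk : k + 1 < xs.length := by
      simp [PySem.List.length_pyRange_one] at h1; omega
    simp only [List.getElem_map, PySem.List.getElem_pyRange_one, List.getElem_zip,
      List.getElem_tail]
    have e1 : (1 : Int) + (k : Int) - 1 = ((k : Nat) : Int) := by omega
    have e2 : (1 : Int) + (k : Int) = (((k + 1 : Nat)) : Int) := by omega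
    rw [e1, e2, PySem.List.pyGetD_eq_getElem _ _ (by positivity) (by exact_mod_cast by omega),
      PySem.List.pyGetD_eq_getElem _ _ (by positivity) (by exact_mod_cast hk)]
    simp

-- the tail of A's loop (indices 1..n-1) appends one fragment per consecutive pair
theorem pv_tail (xs : List String) (s : Int) (acc : String) :
    (PySem.List.pyRange 1 (xs.length : Int) 1).foldl
      (fun result i =>
        if i == 0 then
          result ++ "\\d" ++
            ("{" ++ PySem.Int.toStr ((PySem.Int.ofStr? (PySem.List.pyGetD xs i "")).getD 0 - s) ++ "}")
        else
          result ++ "(\\d" ++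
            ("{" ++ PySem.Int.toStr ((PySem.Int.ofStr? (PySem.List.pyGetD xs i "")).getD 0 -
              (PySem.Int.ofStr? (PySem.List.pyGetD xs (i - 1) "")).getD 0) ++ "})?")) acc
    = acc ++ PySem.Str.join "" ((xs.zip xs.tail).map (fun p =>
        "(\\d{" ++ PySem.Int.toStr
          ((PySem.Int.ofStr? p.2).getD 0 - (PySem.Int.ofStr? p.1).getD 0) ++ "})?")) := by
  rw [PySem.List.foldl_congr_mem _ _
      (fun result i => result ++
        ((fun p : String × String => "(\\d{" ++ PySem.Int.toStr
            ((PySem.Int.ofStr? p.2).getD 0 - (PySem.Int.ofStr? p.1).getD 0) ++ "})?")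
          ((fun i : Int => (PySem.List.pyGetD xs (i - 1) "", PySem.List.pyGetD xs i "")) i))) acc
      (by
        intro r i hi
        have h1 : (1 : Int) ≤ i := (PySem.List.mem_pyRange_one.mp hi).1
        have h0 : (i == (0 : Int)) = false := by simp; omega
        simp only [h0, Bool.false_eq_true, if_false]
        apply String.toList_inj.mp
        simp [String.toList_append])]
  rw [← pv_map_pairs xs]
  rw [← List.foldl_map
    (f := fun i : Int => (PySem.List.pyGetD xs (i - 1) "", PySem.List.pyGetD xs i ""))
    (g := fun r (p : String × String) => r ++
      ("(\\d{" ++ PySem.Int.toStr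
        ((PySem.Int.ofStr? p.2).getD 0 - (PySem.Int.ofStr? p.1).getD 0) ++ "})?"))]
  exact pv_foldl_append_join _ _ _

-- pvTailList, seeded with the parse of the previous section, is the join over consecutive pairs
theorem pv_tailList_zip (rest : List String) : ∀ (x : String),
    pvTailList ((PySem.Int.ofStr? x).getD 0) rest
      = PySem.Str.join "" (((x :: rest).zip rest).map (fun p =>
          "(\\d{" ++ PySem.Int.toStr
            ((PySem.Int.ofStr? p.2).getD 0 - (PySem.Int.ofStr? p.1).getD 0) ++ "})?")) := by
  induction rest with
  | nil => intro x; rfl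
  | cons y t ih =>
    intro x
    simp only [pvTailList, List.zip_cons_cons, List.map_cons]
    rw [pv_join_empty_cons, ih y]

-- A's whole loop, for a section list written head :: rest
theorem pv_A_loop (x0 : String) (rest : List String) (s : Int) :
    (PySem.List.pyRange 0 ((x0 :: rest).length : Int) 1).foldl
      (fun result i =>
        if i == 0 then
          result ++ "\\d" ++
            ("{" ++ PySem.Int.toStr ((PySem.Int.ofStr? (PySem.List.pyGetD (x0 :: rest) i "")).getD 0 - s) ++ "}")
        else
          result ++ "(\\d" ++
            ("{" ++ PySem.Int.toStr ((PySem.Int.ofStr? (PySem.List.pyGetD (x0 :: rest) i "")).getD 0 -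
              (PySem.Int.ofStr? (PySem.List.pyGetD (x0 :: rest) (i - 1) "")).getD 0) ++ "})?")) ""
    = "\\d{" ++ PySem.Int.toStr ((PySem.Int.ofStr? x0).getD 0 - s) ++ "}" ++
        pvTailList ((PySem.Int.ofStr? x0).getD 0) rest := by
  have hn : (0 : Int) < (((x0 :: rest).length : Nat) : Int) := by
    have : 0 < (x0 :: rest).length := by simp
    exact_mod_cast this
  rw [PySem.List.pyRange_one_cons hn, List.foldl_cons]
  have hget0 : PySem.List.pyGetD (x0 :: rest) (0 : Int) "" = x0 := by
    rw [PySem.List.pyGetD_eq_getElem _ _ le_rfl (by exact_mod_cast Nat.succ_pos rest.length)]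
    simp
  have h01 : (0 : Int) + 1 = 1 := by norm_num
  simp only [beq_self_eq_true, if_true, hget0, h01]
  rw [pv_tail (x0 :: rest) s, pv_tailList_zip rest x0]
  simp only [List.tail_cons]
  apply String.toList_inj.mp
  simp [String.toList_append]

-- ===== VERDICT =====
theorem get_number_length_spec : Claim_equal_get_number_length := by
  intro data s _ _
  unfold Spec_get_number_length get_number_length get_number_length_alt
  have hsplit : (PySem.Str.split? data ",").getD []
      = ((pvPartition data.toList).1 ::
          (if (pvPartition data.toList).2.1 then
            PySem.Chars.splitOn (pvPartition data.toList).2.2 [','] else [])).map String.ofList := by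
    have h1 : PySem.Chars.splitOn data.toList [','] =
        (pvPartition data.toList).1 ::
          (if (pvPartition data.toList).2.1 then
            PySem.Chars.splitOn (pvPartition data.toList).2.2 [','] else []) := by
      rw [PySem.Chars.splitOn,
        pv_go_part data.toList (data.toList.length + 1) [] [] (Nat.lt_succ_self _)]
      simp
    simp [PySem.Str.split?, PySem.Chars.split?, h1]
  rw [hsplit]
  simp only [List.map_cons]
  rw [pv_A_loop, pv_go_eq_tailList]
  have hx : (PySem.Int.ofStr? (String.ofList (pvPartition data.toList).1)).getD 0
      = (PySem.Int.ofChars? (pvPartition data.toList).1).getD 0 := by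
    simp [PySem.Int.ofStr?]
  rw [hx]
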